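-- pv_equiv track=rewrite | github.com/yongseokoh/ceph | qa/tasks/cephfs/test_mds_dmclock_qos.py | is_equal_dict
-- ===== SOURCE A (Python) =====
-- def is_equal_dict(a, b, ignore_key=[]):
--     ignore_key = set(ignore_key)
--     for key in a:
--         if key in ignore_key:
--             continue
--         if key not in b:
--             return False
--         if a[key] != b[key]:
--             return False
--     return True
-- ===== SOURCE B (Python) =====
-- def is_equal_dict(a, b, ignore_key=[]):
--     ig = set(ignore_key)
--     left = sorted(((k, v) for k, v in a.items() if k not in ig), key=lambda kv: kv[0])
--     right = sorted(((k, b[k]) for k in b if k in a and k not in ig), key=lambda kv: kv[0])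
--     return left == right
-- ===== Notes on version B (the rewrite author's own statement) =====
-- stated objective: alternative
-- what changed: Replaces A's single short-circuiting per-key scan with a sort-and-compare algorithm: materialise the checked items of a and the matching projection of b, sort both by key, and test list equality.
import Mathlib
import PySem

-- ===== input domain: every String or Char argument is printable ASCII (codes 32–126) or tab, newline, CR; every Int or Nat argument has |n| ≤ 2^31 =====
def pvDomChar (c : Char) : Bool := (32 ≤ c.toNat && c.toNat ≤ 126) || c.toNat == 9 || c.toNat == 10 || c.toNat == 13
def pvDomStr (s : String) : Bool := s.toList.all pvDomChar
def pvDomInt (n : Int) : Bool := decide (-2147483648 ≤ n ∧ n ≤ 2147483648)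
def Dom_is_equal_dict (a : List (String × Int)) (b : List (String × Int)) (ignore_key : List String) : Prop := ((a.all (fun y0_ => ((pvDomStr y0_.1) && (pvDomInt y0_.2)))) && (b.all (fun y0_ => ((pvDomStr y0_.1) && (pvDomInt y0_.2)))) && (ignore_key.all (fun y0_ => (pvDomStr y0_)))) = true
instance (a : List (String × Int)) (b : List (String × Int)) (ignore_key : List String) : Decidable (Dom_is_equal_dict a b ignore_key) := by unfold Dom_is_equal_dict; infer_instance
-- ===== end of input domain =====

-- B replaces A's single short-circuiting key scan with sort-and-compare: sort a's checked items and b's matching projection by key and test list equality (alternative algorithm, not faster).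


-- ===== PORT A =====
-- the loop 'for key in a: …' with its three branches and early returns
def isEqGoA (da db : PySem.Dict String Int) (ig : PySem.Set String) : List String → Bool
  | [] => true
  | k :: ks =>
    if PySem.Set.contains ig k then isEqGoA da db ig ks
    else if !(db.contains k) then false
    else if da.getD k 0 != db.getD k 0 then false
    else isEqGoA da db ig ks

def is_equal_dict (a : List (String × Int)) (b : List (String × Int)) (ignore_key : List String) : Bool :=
  let da := PySem.Dict.ofList a
  let db := PySem.Dict.ofList b
  let ig := PySem.Set.ofList ignore_key
  isEqGoA da db ig da.keys

-- ===== PORT B =====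
def is_equal_dict_alt (a : List (String × Int)) (b : List (String × Int)) (ignore_key : List String) : Bool :=
  let da := PySem.Dict.ofList a
  let db := PySem.Dict.ofList b
  let ig := PySem.Set.ofList ignore_key
  -- left = sorted((k, v) for k, v in a.items() if k not in ig, key=lambda kv: kv[0])
  let left := PySem.List.sorted (da.items.filter (fun kv => !(PySem.Set.contains ig kv.1))) (fun kv => kv.1) false
  -- right = sorted((k, b[k]) for k in b if k in a and k not in ig, key=lambda kv: kv[0])
  let right := PySem.List.sorted
    ((db.keys.filter (fun k => da.contains k && !(PySem.Set.contains ig k))).map (fun k => (k, db.getD k 0)))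
    (fun kv => kv.1) false
  left == right

-- ===== PRECONDITION & SPEC =====
def Spec_is_equal_dict (a : List (String × Int)) (b : List (String × Int)) (ignore_key : List String) (out : Bool) : Prop := out = is_equal_dict_alt a b ignore_key
instance (a : List (String × Int)) (b : List (String × Int)) (ignore_key : List String) (out : Bool) : Decidable (Spec_is_equal_dict a b ignore_key out) := by unfold Spec_is_equal_dict; infer_instance

-- ===== CLAIM (what is proved, stated in full; the proofs are below) =====
def Claim_equal_is_equal_dict : Prop := ∀ (a : List (String × Int)) (b : List (String × Int)) (ignore_key : List String), Dom_is_equal_dict a b ignore_key → Spec_is_equal_dict a b ignore_key (is_equal_dict a b ignore_key)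

-- ===== LEMMAS AND PROOFS =====
-- A's loop is the conjunction of its per-key test over the traversed keys
theorem isEqGoA_eq_all (da db : PySem.Dict String Int) (ig : PySem.Set String) (ks : List String) :
    isEqGoA da db ig ks
      = ks.all (fun k => PySem.Set.contains ig k || (db.contains k && (da.getD k 0 == db.getD k 0))) := by
  induction ks with
  | nil => rfl
  | cons k ks ih =>
    simp only [isEqGoA, List.all_cons, ih]
    by_cases h1 : k ∈ ig
    · simp [h1]
    · by_cases h2 : db.contains k
      · by_cases h3 : da.getD k 0 = db.getD k 0 <;> simp [h1, h2, h3]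
      · simp [h1, h2]

-- two lists with distinct keys sorted by key are equal iff they are permutations of each other
theorem sorted_fst_eq_iff_perm (L R : List (String × Int))
    (hL : (L.map Prod.fst).Nodup) (hR : (R.map Prod.fst).Nodup) :
    (PySem.List.sorted L (fun kv => kv.1) false = PySem.List.sorted R (fun kv => kv.1) false) ↔ L.Perm R := by
  constructor
  · intro h
    exact ((PySem.List.sorted_perm L (fun kv => kv.1) false).symm.trans
      (h ▸ PySem.List.sorted_perm R (fun kv => kv.1) false))
  · intro hperm
    have key : ∀ (X : List (String × Int)), (X.map Prod.fst).Nodup →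
        (PySem.List.sorted X (fun kv => kv.1) false).Pairwise (fun p q => p.1 < q.1) := by
      intro X hX
      have hle := PySem.List.sorted_pairwise X (fun kv => kv.1)
      have hperm' : (PySem.List.sorted X (fun kv => kv.1) false).Perm X :=
        PySem.List.sorted_perm X (fun kv => kv.1) false
      have hnd : ((PySem.List.sorted X (fun kv => kv.1) false).map Prod.fst).Nodup :=
        (hperm'.map Prod.fst).nodup_iff.mpr hX
      have hne : (PySem.List.sorted X (fun kv => kv.1) false).Pairwise (fun p q => p.1 ≠ q.1) :=
        (List.pairwise_map).mp hnd
      exact (hle.and hne).imp (fun h => lt_of_le_of_ne h.1 h.2)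
    have hp : (PySem.List.sorted L (fun kv => kv.1) false).Perm (PySem.List.sorted R (fun kv => kv.1) false) :=
      ((PySem.List.sorted_perm L (fun kv => kv.1) false).trans hperm).trans
        (PySem.List.sorted_perm R (fun kv => kv.1) false).symm
    exact hp.eq_of_pairwise
      (fun p q _ _ h1 h2 => absurd (lt_trans h1 h2) (lt_irrefl _)) (key L hL) (key R hR)

-- B returns true exactly on the per-key condition A's loop tests
theorem alt_eq_true_iff (a b : List (String × Int)) (ignore_key : List String) :
    is_equal_dict_alt a b ignore_key = true ↔
      ∀ k ∈ (PySem.Dict.ofList a).keys, k ∉ ignore_key →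
        k ∈ (PySem.Dict.ofList b).keys ∧
          (PySem.Dict.ofList a).getD k 0 = (PySem.Dict.ofList b).getD k 0 := by
  unfold is_equal_dict_alt
  simp only [beq_iff_eq]
  set da := PySem.Dict.ofList a with hda
  set db := PySem.Dict.ofList b with hdb
  have hnda : da.keys.Nodup := PySem.Dict.nodup_keys_ofList a
  have hndb : db.keys.Nodup := PySem.Dict.nodup_keys_ofList b
  set L := da.items.filter (fun kv => !(PySem.Set.contains (PySem.Set.ofList ignore_key) kv.1)) with hLdef
  set R := (db.keys.filter (fun k => da.contains k && !(PySem.Set.contains (PySem.Set.ofList ignore_key) k))).map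
      (fun k => (k, db.getD k 0)) with hRdef
  have hLnd : (L.map Prod.fst).Nodup := by
    have h : List.Sublist (L.map Prod.fst) (da.items.map Prod.fst) :=
      List.Sublist.map Prod.fst List.filter_sublist
    exact h.nodup hnda
  have hRnd : (R.map Prod.fst).Nodup := by
    have hmap : R.map Prod.fst = db.keys.filter (fun k => da.contains k && !(PySem.Set.contains (PySem.Set.ofList ignore_key) k)) := by
      simp [hRdef, List.map_map, Function.comp_def]
    rw [hmap]
    exact List.Sublist.nodup List.filter_sublist hndb
  rw [sorted_fst_eq_iff_perm L R hLnd hRnd,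
      List.perm_ext_iff_of_nodup (hLnd.of_map) (hRnd.of_map)]
  have memL : ∀ x : String × Int, x ∈ L ↔ (x ∈ da.items ∧ x.1 ∉ ignore_key) := by
    intro x
    simp [hLdef, List.mem_filter]
  have memR : ∀ x : String × Int,
      x ∈ R ↔ (x.1 ∈ db.keys ∧ x.1 ∈ da.keys ∧ x.1 ∉ ignore_key ∧ x.2 = db.getD x.1 0) := by
    intro x
    simp only [hRdef, List.mem_map, List.mem_filter, Bool.and_eq_true, Bool.not_eq_true',
      PySem.Dict.contains_iff_mem_keys]
    constructor
    · rintro ⟨k, ⟨hkb, hka, hkig⟩, rfl⟩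
      refine ⟨hkb, ?_, ?_, rfl⟩
      · simpa using hka
      · simpa using hkig
    · rintro ⟨hkb, hka, hkig, hval⟩
      refine ⟨x.1, ⟨hkb, ?_, by simpa using hkig⟩, ?_⟩
      · simpa using hka
      · cases x; simp_all
  constructor
  · intro h k hka hkig
    have hx : (k, da.getD k 0) ∈ L := by
      rw [memL]
      refine ⟨?_, hkig⟩
      rcases List.mem_map.mp hka with ⟨p, hp, hfst⟩
      have hp' : (p.1, p.2) ∈ da.items := by simpa using hp
      have : da.getD k 0 = p.2 := by
        rw [← hfst]; exact PySem.Dict.getD_of_mem_items da hp' hnda 0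
      rw [this, ← hfst]
      simpa using hp
    have := (h _).mp hx
    rw [memR] at this
    exact ⟨this.1, this.2.2.2⟩
  · intro h x
    rw [memL, memR]
    constructor
    · rintro ⟨hitems, hig⟩
      have hka : x.1 ∈ da.keys := List.mem_map.mpr ⟨x, hitems, rfl⟩
      obtain ⟨hkb, hval⟩ := h x.1 hka hig
      have hitems' : (x.1, x.2) ∈ da.items := by simpa using hitems
      have hx2 : da.getD x.1 0 = x.2 := PySem.Dict.getD_of_mem_items da hitems' hnda 0
      exact ⟨hkb, hka, hig, by rw [← hval, hx2]⟩
    · rintro ⟨hkb, hka, hig, hval⟩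
      refine ⟨?_, hig⟩
      obtain ⟨_, hvala⟩ := h x.1 hka hig
      have : da.getD x.1 0 = x.2 := by rw [hvala, ← hval]
      rcases List.mem_map.mp hka with ⟨p, hp, hfst⟩
      have hp' : (p.1, p.2) ∈ da.items := by simpa using hp
      have hpv : da.getD p.1 0 = p.2 := PySem.Dict.getD_of_mem_items da hp' hnda 0
      have h2 : x.2 = p.2 := by rw [hval, ← hvala, ← hfst, hpv]
      have hxp : x = p := Prod.ext hfst.symm h2
      rw [hxp]; exact hp

-- ===== VERDICT (by name: the statement is the Claim_ definition above) =====
theorem is_equal_dict_spec : Claim_equal_is_equal_dict := by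
  intro a b ignore_key _
  unfold Spec_is_equal_dict
  rw [Bool.eq_iff_iff, alt_eq_true_iff]
  unfold is_equal_dict
  rw [isEqGoA_eq_all]
  simp only [List.all_eq_true, Bool.or_eq_true, Bool.and_eq_true, beq_iff_eq,
    PySem.Set.contains_iff, PySem.Set.mem_ofList, PySem.Dict.contains_iff_mem_keys]
  constructor
  · intro h k hk hig
    rcases h k hk with h' | ⟨h1, h2⟩
    · exact absurd h' hig
    · exact ⟨h1, h2⟩
  · intro h k hk
    by_cases hig : k ∈ ignore_key
    · exact Or.inl hig
    · exact Or.inr (h k hk hig)
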